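-- pv_equiv track=rewrite | github.com/tncyblgn/kTour | c.py | value_checker
-- ===== SOURCE A (Python) =====
-- def value_checker(final, lst):
--     change_list = []
--     for l in lst:
--         for i in range(len(final)):
--             for j in final[i]:
--                 if l == j:
--                     if final[i] not in change_list:
--                         change_list.append(final[i])
--     return change_list
-- ===== SOURCE B (Python) =====
-- def value_checker(final, lst):
--     index = {}
--     for i, sub in enumerate(final):
--         for v in dict.fromkeys(sub):
--             index.setdefault(v, []).append(i)
--     seen = set()
--     out = []
--     for l in lst:
--         for i in index.get(l, []):
--             t = tuple(final[i])
--             if t not in seen: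
--                 seen.add(t)
--                 out.append(final[i])
--     return out
-- ===== Notes on version B (the rewrite author's own statement) =====
-- stated objective: faster
-- what changed: B precomputes a value-to-sublist-indices dict in one pass over final and then walks lst looking up each value, with a seen-set replacing A's linear 'not in change_list' scan; A's triple nested loop over lst x final x elements disappears.
import Mathlib
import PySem

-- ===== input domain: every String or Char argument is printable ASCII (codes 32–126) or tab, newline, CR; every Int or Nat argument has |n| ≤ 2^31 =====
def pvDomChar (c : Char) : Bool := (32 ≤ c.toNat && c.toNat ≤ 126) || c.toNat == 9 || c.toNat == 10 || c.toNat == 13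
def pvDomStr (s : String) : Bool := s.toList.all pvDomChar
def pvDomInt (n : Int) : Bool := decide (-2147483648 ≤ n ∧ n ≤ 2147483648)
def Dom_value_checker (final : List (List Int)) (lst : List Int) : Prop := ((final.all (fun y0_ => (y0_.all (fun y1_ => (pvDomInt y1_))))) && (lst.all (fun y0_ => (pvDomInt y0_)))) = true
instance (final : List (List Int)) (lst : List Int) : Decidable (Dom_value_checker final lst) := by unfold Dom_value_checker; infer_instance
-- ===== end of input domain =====

-- B replaces A's triple nested scan by a precomputed value→indices dict plus a seen-set,
-- removing both the per-element inner loop and the linear `not in change_list` scan (objective: faster).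

-- ===== PORT A =====
def value_checker (final : List (List Int)) (lst : List Int) : List (List Int) :=
  lst.foldl (fun change_list l =>
    (PySem.List.pyRange 0 (PySem.List.len final)).foldl (fun change_list i =>
      (PySem.List.pyGetD final i []).foldl (fun change_list j =>
        if l == j then
          (if PySem.List.pyGetD final i [] ∈ change_list then change_list
           else change_list ++ [PySem.List.pyGetD final i []])
        else change_list) change_list) change_list) []

-- ===== PORT B =====
def value_checker_alt (final : List (List Int)) (lst : List Int) : List (List Int) :=
  let index : PySem.Dict Int (List Int) :=
    (PySem.List.enumerate final).foldl
      (fun d p => (PySem.List.dedup p.2).foldl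
        (fun d v => d.modify v [] (fun is => is ++ [p.1])) d)
      PySem.Dict.empty
  (lst.foldl (fun (st : PySem.Set (List Int) × List (List Int)) l =>
      (index.getD l []).foldl (fun st i =>
        let t := PySem.List.pyGetD final i []
        if PySem.Set.contains st.1 t then st
        else (PySem.Set.add st.1 t, st.2 ++ [t])) st)
    (PySem.Set.empty, [])).2

-- ===== PRECONDITION & SPEC =====
def Spec_value_checker (final : List (List Int)) (lst : List Int) (out : List (List Int)) : Prop := out = value_checker_alt final lst
instance (final : List (List Int)) (lst : List Int) (out : List (List Int)) : Decidable (Spec_value_checker final lst out) := by unfold Spec_value_checker; infer_instance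

-- ===== CLAIM (what is proved, stated in full; the proofs are below) =====
def Claim_equal_value_checker : Prop := ∀ (final : List (List Int)) (lst : List Int), Dom_value_checker final lst → Spec_value_checker final lst (value_checker final lst)

-- ===== LEMMAS AND PROOFS =====

-- the common reference: for each l, append (once, by value) each sublist of `final` containing l
def vcStep (final : List (List Int)) (cl : List (List Int)) (l : Int) : List (List Int) :=
  (final.filter (fun sub => decide (l ∈ sub))).foldl
    (fun cl t => if t ∈ cl then cl else cl ++ [t]) cl

-- A's innermost loop is a no-op once `sub` is already collected
theorem vc_inner_of_mem (l : Int) (sub : List Int) (xs : List Int) (cl : List (List Int))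
    (h : sub ∈ cl) :
    xs.foldl (fun cl j => if l == j then (if sub ∈ cl then cl else cl ++ [sub]) else cl) cl = cl := by
  induction xs generalizing cl with
  | nil => rfl
  | cons j xs ih =>
    rw [List.foldl_cons]
    have hbody : (if l == j then (if sub ∈ cl then cl else cl ++ [sub]) else cl) = cl := by
      by_cases hj : (l == j) = true <;> simp [hj, h]
    rw [hbody]
    exact ih cl h

-- A's innermost loop = "if l occurs in xs, insert sub once"
theorem vc_inner (l : Int) (sub : List Int) (xs : List Int) (cl : List (List Int)) :
    xs.foldl (fun cl j => if l == j then (if sub ∈ cl then cl else cl ++ [sub]) else cl) cl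
      = if l ∈ xs then (if sub ∈ cl then cl else cl ++ [sub]) else cl := by
  induction xs generalizing cl with
  | nil => simp
  | cons j xs ih =>
    rw [List.foldl_cons]
    by_cases hj : (l == j) = true
    · rw [if_pos hj]
      have hl : l ∈ j :: xs := by simp [eq_of_beq hj]
      rw [if_pos hl]
      have hsub : sub ∈ (if sub ∈ cl then cl else cl ++ [sub]) := by
        by_cases h : sub ∈ cl <;> simp [h]
      exact vc_inner_of_mem l sub xs _ hsub
    · rw [if_neg (by simpa using hj), ih]
      have hne : l ≠ j := by simpa using hj
      simp [List.mem_cons, hne]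

-- A = fold of vcStep
theorem vcA_eq (final : List (List Int)) (lst : List Int) :
    value_checker final lst = lst.foldl (vcStep final) [] := by
  unfold value_checker
  refine PySem.List.foldl_congr_mem lst _ _ [] (fun cl l _ => ?_)
  rw [PySem.List.foldl_pyRange_pyGetD final []
      (f := fun acc sub => sub.foldl
        (fun cl j => if l == j then (if sub ∈ cl then cl else cl ++ [sub]) else cl) acc)
      (init := cl) (le_refl 0)]
  simp only [Int.toNat_zero, List.drop_zero]
  rw [PySem.List.foldl_congr_mem final _
      (fun cl sub => if l ∈ sub then (if sub ∈ cl then cl else cl ++ [sub]) else cl) cl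
      (fun acc sub _ => vc_inner l sub sub acc)]
  rw [PySem.List.foldl_ite_eq_foldl_filter (p := fun sub => l ∈ sub)
      (f := fun cl sub => if sub ∈ cl then cl else cl ++ [sub])]
  rfl

-- effect of one nodup block of modifies on the index dict
theorem vc_modify_fold (i : Int) (ws : List Int) (hnd : ws.Nodup)
    (d : PySem.Dict Int (List Int)) (v : Int) :
    (ws.foldl (fun d w => d.modify w [] (fun is => is ++ [i])) d).getD v []
      = d.getD v [] ++ (if v ∈ ws then [i] else []) := by
  induction ws generalizing d with
  | nil => simp
  | cons w ws ih =>
    rw [List.foldl_cons, ih (List.nodup_cons.mp hnd).2]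
    by_cases hv : v = w
    · subst hv
      have hnot : v ∉ ws := (List.nodup_cons.mp hnd).1
      rw [PySem.Dict.getD_modify]
      simp [hnot]
    · rw [PySem.Dict.getD_modify]
      simp [hv, List.mem_cons]

-- effect of one sublist on the index dict
theorem vc_inner_build (i : Int) (sub : List Int) (d : PySem.Dict Int (List Int)) (v : Int) :
    ((PySem.List.dedup sub).foldl (fun d w => d.modify w [] (fun is => is ++ [i])) d).getD v []
      = d.getD v [] ++ (if v ∈ sub then [i] else []) := by
  rw [vc_modify_fold i _ (PySem.List.nodup_dedup sub)]
  by_cases h : v ∈ sub <;> simp [h]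

-- the whole index-building loop, over any pair list
theorem vc_build (ps : List (Int × List Int)) (d : PySem.Dict Int (List Int)) (v : Int) :
    (ps.foldl (fun d p => (PySem.List.dedup p.2).foldl
        (fun d w => d.modify w [] (fun is => is ++ [p.1])) d) d).getD v []
      = d.getD v [] ++ (ps.filter (fun p => decide (v ∈ p.2))).map (·.1) := by
  induction ps generalizing d with
  | nil => simp
  | cons p ps ih =>
    rw [List.foldl_cons, ih, vc_inner_build, List.filter_cons]
    by_cases h : v ∈ p.2 <;> simp [h]

theorem vc_enum_snd (v : Int) (xs : List (List Int)) (s : Int) :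
    ((PySem.List.enumerate xs s).filter (fun p => decide (v ∈ p.2))).map (·.2)
      = xs.filter (fun sub => decide (v ∈ sub)) := by
  induction xs generalizing s with
  | nil => simp [PySem.List.enumerate_nil]
  | cons x xs ih =>
    rw [PySem.List.enumerate_cons]
    by_cases h : v ∈ x <;> simp [h, ih]

-- indices stored in the dict point back at the sublists they came from
theorem vc_enum_fold (final : List (List Int)) (v : Int)
    (g : (PySem.Set (List Int) × List (List Int)) → List Int → (PySem.Set (List Int) × List (List Int)))
    (st : PySem.Set (List Int) × List (List Int)) :
    (((PySem.List.enumerate final).filter (fun p => decide (v ∈ p.2))).map (·.1)).foldl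
        (fun st i => g st (PySem.List.pyGetD final i [])) st
      = (final.filter (fun sub => decide (v ∈ sub))).foldl g st := by
  rw [List.foldl_map]
  rw [PySem.List.foldl_congr_mem _ _ (fun st (p : Int × List Int) => g st p.2) st ?h]
  · rw [← List.foldl_map (f := fun (p : Int × List Int) => p.2) (g := g), vc_enum_snd]
  case h =>
    intro st p hp
    have hp' := List.mem_of_mem_filter hp
    rw [PySem.List.mem_enumerate_iff] at hp'
    obtain ⟨k, hk, rfl⟩ := hp'
    simp [PySem.List.pyGetD_natCast, List.getD_eq_getElem?_getD, List.getElem?_eq_getElem hk]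

-- the seen-set always equals the output list
theorem vc_pairfold (cs : List (List Int)) (s : List (List Int)) :
    cs.foldl (fun st t => if PySem.Set.contains st.1 t then st
        else (PySem.Set.add st.1 t, st.2 ++ [t])) (s, s)
      = (cs.foldl (fun cl t => if t ∈ cl then cl else cl ++ [t]) s,
         cs.foldl (fun cl t => if t ∈ cl then cl else cl ++ [t]) s) := by
  induction cs generalizing s with
  | nil => rfl
  | cons t cs ih =>
    simp only [List.foldl_cons]
    by_cases h : t ∈ s
    · simpa [PySem.Set.contains, h] using ih s
    · simpa [PySem.Set.contains, PySem.Set.add, h] using ih (s ++ [t])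

-- B = fold of vcStep
theorem vcB_eq (final : List (List Int)) (lst : List Int) :
    value_checker_alt final lst = lst.foldl (vcStep final) [] := by
  unfold value_checker_alt
  have hidx : ∀ v : Int,
      (((PySem.List.enumerate final).foldl
        (fun d p => (PySem.List.dedup p.2).foldl
          (fun d v => d.modify v [] (fun is => is ++ [p.1])) d)
        PySem.Dict.empty).getD v [])
      = ((PySem.List.enumerate final).filter (fun p => decide (v ∈ p.2))).map (·.1) := by
    intro v
    rw [vc_build]
    simp [PySem.Dict.empty, PySem.Dict.getD, PySem.Dict.get?]
  have key : ∀ (s : List (List Int)),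
      lst.foldl (fun (st : PySem.Set (List Int) × List (List Int)) l =>
        ((((PySem.List.enumerate final).foldl
          (fun d p => (PySem.List.dedup p.2).foldl
            (fun d v => d.modify v [] (fun is => is ++ [p.1])) d)
          PySem.Dict.empty).getD l []).foldl (fun st i =>
            let t := PySem.List.pyGetD final i []
            if PySem.Set.contains st.1 t then st
            else (PySem.Set.add st.1 t, st.2 ++ [t])) st)) (s, s)
      = (lst.foldl (vcStep final) s, lst.foldl (vcStep final) s) := by
    induction lst with
    | nil => intro s; rfl
    | cons l lst ih =>
      intro s
      rw [List.foldl_cons, List.foldl_cons, hidx l]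
      rw [vc_enum_fold final l
        (fun st t => if PySem.Set.contains st.1 t then st
          else (PySem.Set.add st.1 t, st.2 ++ [t])) (s, s)]
      rw [vc_pairfold]
      exact ih (vcStep final s l)
  exact congrArg Prod.snd (key [])

-- ===== VERDICT (by name: the statement is the Claim_ definition above) =====
theorem value_checker_spec : Claim_equal_value_checker := by
  intro final lst _
  unfold Spec_value_checker
  rw [vcA_eq, vcB_eq]
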